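-- pv_equiv track=rewrite | github.com/tunyash/cube_decomposition | small_certificate_large_local.py | find_minterms
-- ===== SOURCE A (Python) =====
-- from typing import List, Tuple
--
-- def take_log(two_to_n: int) -> int:
--     n = 1
--     while 2**n < two_to_n:
--         n += 1
--     return n
--
-- def find_minterms(f: List[int]) -> List[int]:
--     n = take_log(len(f))
--     answer = []
--     for i, v in enumerate(f):
--         if f[i] == 0:
--             continue
--         minterm = True
--         for j in range(n):
--             if (i & (1<<j)) != 0:
--                 if f[i ^ (1<<j)] == 1:
--                     minterm = False
--                     break
--         if minterm:
--             answer.append(i)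
--     return answer
-- ===== SOURCE B (Python) =====
-- from typing import List
--
-- def take_log(two_to_n: int) -> int:
--     n = 1
--     while 2**n < two_to_n:
--         n += 1
--     return n
--
-- def find_minterms(f: List[int]) -> List[int]:
--     # Forward push: every cell equal to 1 marks its upper neighbors as dominated,
--     # then keep the nonzero cells that were never marked.
--     n = take_log(len(f))
--     dominated = set()
--     for k, v in enumerate(f):
--         if v == 1:
--             for j in range(n):
--                 if (k & (1 << j)) == 0:
--                     dominated.add(k | (1 << j))
--     return [i for i, v in enumerate(f) if v != 0 and i not in dominated]
-- ===== Notes on version B (the rewrite author's own statement) =====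
-- stated objective: faster
-- what changed: Replaces A's per-candidate pull (scan each nonzero index's lower neighbors with repeated list indexing and an early break) by a forward push: one pass marks the upper neighbors of every cell equal to 1 into a dominated set, then a comprehension keeps the unmarked nonzero indices.
import Mathlib
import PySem

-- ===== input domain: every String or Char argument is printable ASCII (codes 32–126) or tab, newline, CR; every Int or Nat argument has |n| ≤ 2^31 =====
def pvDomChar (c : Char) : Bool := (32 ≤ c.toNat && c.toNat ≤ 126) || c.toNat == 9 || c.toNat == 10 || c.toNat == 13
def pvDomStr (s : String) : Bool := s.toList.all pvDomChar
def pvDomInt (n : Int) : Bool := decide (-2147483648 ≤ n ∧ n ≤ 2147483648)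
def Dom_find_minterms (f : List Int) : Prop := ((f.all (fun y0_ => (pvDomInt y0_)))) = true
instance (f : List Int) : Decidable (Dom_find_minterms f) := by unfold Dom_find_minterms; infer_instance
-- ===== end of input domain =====

-- B replaces A's per-candidate scan of lower neighbors by a forward push that marks the
-- dominated upper neighbors of 1-cells into a set (same asymptotics, measurably faster).


-- ===== PORT A =====
-- take_log: 'n = 1; while 2**n < two_to_n: n += 1; return n' (applied to len(f), a Nat)
def takeLogAux (two_to_n : Nat) (n : Nat) : Nat :=
  if 2 ^ n < two_to_n then takeLogAux two_to_n (n + 1) else n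
termination_by two_to_n - 2 ^ n
decreasing_by
  have h1 : 2 ^ n < 2 ^ (n + 1) := Nat.pow_lt_pow_right (by omega) (by omega)
  omega

-- the inner 'for j in range(n)' loop with its break; the indexing f[i ^ (1<<j)] is
-- always in range (i ^ (1<<j) < i < len f since bit j of i is set), so pyGetD is exact
def mintermCheck (f : List Int) (i : Int) : List Int → Bool
  | [] => true
  | j :: js =>
    if PySem.Int.band i ((1:Int) <<< j) != 0 then
      if PySem.List.pyGetD f (PySem.Int.bxor i ((1:Int) <<< j)) 0 == 1 then false
      else mintermCheck f i js
    else mintermCheck f i js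

def find_minterms (f : List Int) : List Int :=
  let n := takeLogAux f.length 1
  (PySem.List.enumerate f 0).foldl (fun answer iv =>
    if PySem.List.pyGetD f iv.1 0 == 0 then answer
    else if mintermCheck f iv.1 (PySem.List.pyRange 0 (n : Int) 1) then answer ++ [iv.1]
    else answer) []

-- ===== PORT B =====
-- the 'dominated' set: every cell equal to 1 marks its upper neighbors
def dominatedSet (f : List Int) (n : Nat) : PySem.Set Int :=
  (PySem.List.enumerate f 0).foldl (fun d kv =>
    if kv.2 == 1 then
      (PySem.List.pyRange 0 (n : Int) 1).foldl (fun d j =>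
        if PySem.Int.band kv.1 ((1:Int) <<< j) == 0 then
          PySem.Set.add d (PySem.Int.bor kv.1 ((1:Int) <<< j))
        else d) d
    else d) PySem.Set.empty

def find_minterms_alt (f : List Int) : List Int :=
  let n := takeLogAux f.length 1
  let dom := dominatedSet f n
  ((PySem.List.enumerate f 0).filter
      (fun iv => iv.2 != 0 && !(PySem.Set.contains dom iv.1))).map (·.1)

-- ===== PRECONDITION & SPEC =====
def Spec_find_minterms (f : List Int) (out : List Int) : Prop := out = find_minterms_alt f
instance (f : List Int) (out : List Int) : Decidable (Spec_find_minterms f out) := by unfold Spec_find_minterms; infer_instance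

-- ===== CLAIM (what is proved, stated in full; the proofs are below) =====
def Claim_equal_find_minterms : Prop := ∀ (f : List Int), Dom_find_minterms f → Spec_find_minterms f (find_minterms f)

-- ===== LEMMAS AND PROOFS =====

lemma shl_cast (j : Nat) : (1:Int) <<< ((j : Nat) : Int) = ((1 <<< j : Nat) : Int) := by
  rw [Int.shiftLeft_natCast_right]; simp

-- the bit test A performs, read on the Nat side
lemma band_eq_zero_iff (k j : Nat) :
    PySem.Int.band (k : Int) ((1:Int) <<< ((j : Nat) : Int)) = 0 ↔ ¬ Nat.testBit k j := by
  rw [shl_cast, PySem.Int.band_natCast]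
  simp [Nat.one_shiftLeft, Nat.and_two_pow]

-- A's inner loop fails exactly when some lower neighbor (flip a set bit) holds 1
lemma mintermCheck_false_iff (f : List Int) (k : Nat) (js : List Nat) :
    mintermCheck f (k : Int) (js.map (fun j => ((j : Nat) : Int))) = false ↔
      ∃ j ∈ js, Nat.testBit k j ∧
        PySem.List.pyGetD f (((k ^^^ (1 <<< j) : Nat)) : Int) 0 = 1 := by
  induction js with
  | nil => simp [mintermCheck]
  | cons j js ih =>
    rw [List.map_cons,
      show mintermCheck f (k:Int) ((j:Int) :: js.map (fun j => ((j : Nat) : Int))) =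
        (if ((k &&& 1 <<< j : Nat) : Int) ≠ 0 then
          if PySem.List.pyGetD f (((k ^^^ (1 <<< j) : Nat)) : Int) 0 = 1 then false
          else mintermCheck f (k:Int) (js.map (fun j => ((j : Nat) : Int)))
        else mintermCheck f (k:Int) (js.map (fun j => ((j : Nat) : Int)))) from by
      simp only [mintermCheck, shl_cast, PySem.Int.band_natCast,
        PySem.Int.bxor_natCast, bne_iff_ne, beq_iff_eq]]
    by_cases hb : Nat.testBit k j
    · have hm : k &&& 1 <<< j = 2 ^ j := by
        simp [Nat.one_shiftLeft, Nat.and_two_pow, hb]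
      rw [if_pos (by simp [hm])]
      by_cases hv : PySem.List.pyGetD f (((k ^^^ (1 <<< j) : Nat)) : Int) 0 = 1
      · rw [if_pos hv]
        exact iff_of_true rfl ⟨j, by simp, hb, hv⟩
      · rw [if_neg hv, ih]
        constructor
        · rintro ⟨j', hj', h1, h2⟩; exact ⟨j', by simp [hj'], h1, h2⟩
        · rintro ⟨j', hj', h1, h2⟩
          rcases List.mem_cons.mp hj' with rfl | hj'
          · exact absurd h2 hv
          · exact ⟨j', hj', h1, h2⟩
    · have hm : k &&& 1 <<< j = 0 := by
        simp [Nat.one_shiftLeft, Nat.and_two_pow, hb]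
      rw [if_neg (by simp [hm]), ih]
      constructor
      · rintro ⟨j', hj', h1, h2⟩; exact ⟨j', by simp [hj'], h1, h2⟩
      · rintro ⟨j', hj', h1, h2⟩
        rcases List.mem_cons.mp hj' with rfl | hj'
        · exact absurd h1 hb
        · exact ⟨j', hj', h1, h2⟩

-- membership in B's inner marking loop
lemma innerFold_mem_list (k x : Int) (js : List Nat) (d : PySem.Set Int) :
    x ∈ (js.map (fun j => ((j : Nat) : Int))).foldl (fun d j =>
        if PySem.Int.band k ((1:Int) <<< j) == 0 then
          PySem.Set.add d (PySem.Int.bor k ((1:Int) <<< j))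
        else d) d ↔
      x ∈ d ∨ ∃ j ∈ js, PySem.Int.band k ((1:Int) <<< ((j : Nat) : Int)) = 0 ∧
        x = PySem.Int.bor k ((1:Int) <<< ((j : Nat) : Int)) := by
  induction js generalizing d with
  | nil => simp
  | cons j js ih =>
    simp only [List.map_cons, List.foldl_cons]
    by_cases hc : PySem.Int.band k ((1:Int) <<< ((j:Nat):Int)) = 0
    · rw [if_pos (by simpa using hc), ih]
      simp only [PySem.Set.mem_add]
      constructor
      · rintro (⟨h | h⟩ | ⟨j', hj', h1, h2⟩)
        · exact Or.inl h
        · exact Or.inr ⟨j, by simp, hc, h⟩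
        · exact Or.inr ⟨j', by simp [hj'], h1, h2⟩
      · rintro (h | ⟨j', hj', h1, h2⟩)
        · exact Or.inl (Or.inl h)
        · rcases List.mem_cons.mp hj' with rfl | hj'
          · exact Or.inl (Or.inr h2)
          · exact Or.inr ⟨j', hj', h1, h2⟩
    · rw [if_neg (by simpa using hc), ih]
      constructor
      · rintro (h | ⟨j', hj', h1, h2⟩)
        · exact Or.inl h
        · exact Or.inr ⟨j', by simp [hj'], h1, h2⟩
      · rintro (h | ⟨j', hj', h1, h2⟩)
        · exact Or.inl h
        · rcases List.mem_cons.mp hj' with rfl | hj'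
          · exact absurd h1 hc
          · exact Or.inr ⟨j', hj', h1, h2⟩

lemma pyRange_map (n : Nat) :
    PySem.List.pyRange 0 (n : Int) 1 = (List.range n).map (fun j => ((j : Nat) : Int)) := by
  rw [PySem.List.pyRange_one]
  simp

-- membership in B's dominated set, over an arbitrary prefix of the outer loop
lemma outerFold_mem (n : Nat) (l : List (Int × Int)) (d : PySem.Set Int) (x : Int) :
    x ∈ l.foldl (fun d kv =>
        if kv.2 == 1 then
          (PySem.List.pyRange 0 (n : Int) 1).foldl (fun d j =>
            if PySem.Int.band kv.1 ((1:Int) <<< j) == 0 then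
              PySem.Set.add d (PySem.Int.bor kv.1 ((1:Int) <<< j))
            else d) d
        else d) d ↔
      x ∈ d ∨ ∃ p ∈ l, p.2 = 1 ∧ ∃ j < n,
        PySem.Int.band p.1 ((1:Int) <<< ((j : Nat) : Int)) = 0 ∧
        x = PySem.Int.bor p.1 ((1:Int) <<< ((j : Nat) : Int)) := by
  induction l generalizing d with
  | nil => simp
  | cons p l ih =>
    simp only [List.foldl_cons]
    by_cases hp : p.2 = 1
    · rw [if_pos (by simpa using hp), ih, pyRange_map, innerFold_mem_list]
      constructor
      · rintro ((h | ⟨j, hj, h1, h2⟩) | ⟨p', hp', h⟩)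
        · exact Or.inl h
        · exact Or.inr ⟨p, by simp, hp, j, by simpa using hj, h1, h2⟩
        · exact Or.inr ⟨p', by simp [hp'], h⟩
      · rintro (h | ⟨p', hp', h1, j, hj, h2, h3⟩)
        · exact Or.inl (Or.inl h)
        · rcases List.mem_cons.mp hp' with rfl | hp'
          · exact Or.inl (Or.inr ⟨j, by simpa using hj, h2, h3⟩)
          · exact Or.inr ⟨p', hp', h1, j, hj, h2, h3⟩
    · rw [if_neg (by simpa using hp), ih]
      constructor
      · rintro (h | ⟨p', hp', h⟩)
        · exact Or.inl h
        · exact Or.inr ⟨p', by simp [hp'], h⟩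
      · rintro (h | ⟨p', hp', h1, h2⟩)
        · exact Or.inl h
        · rcases List.mem_cons.mp hp' with rfl | hp'
          · exact absurd h1 hp
          · exact Or.inr ⟨p', hp', h1, h2⟩

-- membership in B's dominated set, in Nat bit terms
lemma dominatedSet_mem (f : List Int) (n : Nat) (x : Int) :
    x ∈ dominatedSet f n ↔
      ∃ k : Nat, ∃ _ : k < f.length, f[k] = 1 ∧
        ∃ j < n, ¬ Nat.testBit k j ∧ x = ((k ||| (1 <<< j) : Nat) : Int) := by
  unfold dominatedSet
  rw [outerFold_mem]
  simp only [PySem.Set.empty, List.not_mem_nil, false_or]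
  constructor
  · rintro ⟨p, hp, h1, j, hj, h2, h3⟩
    rcases (PySem.List.mem_enumerate_iff _ _ _).mp hp with ⟨k, hk, rfl⟩
    refine ⟨k, hk, by simpa using h1, j, hj, ?_, ?_⟩
    · exact (band_eq_zero_iff k j).mp (by simpa using h2)
    · rw [h3]; simp only [zero_add]
      rw [shl_cast, PySem.Int.bor_natCast]
  · rintro ⟨k, hk, h1, j, hj, h2, h3⟩
    refine ⟨((k : Int), f[k]), (PySem.List.mem_enumerate_iff _ _ _).mpr ⟨k, hk, by simp⟩,
      h1, j, hj, ?_, ?_⟩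
    · exact (band_eq_zero_iff k j).mpr h2
    · rw [h3]; simp only []
      rw [shl_cast, PySem.Int.bor_natCast]

-- clearing a set bit lowers the index, so A's neighbor is to the left
lemma xor_lt_of_testBit (k j : Nat) (hb : Nat.testBit k j) : k ^^^ (1 <<< j) < k := by
  apply Nat.lt_of_testBit j
  · simp [Nat.testBit_xor, Nat.one_shiftLeft, hb]
  · exact hb
  · intro i hi
    have hd : decide (j = i) = false := decide_eq_false (by omega)
    simp [Nat.testBit_xor, Nat.one_shiftLeft, Nat.testBit_two_pow, hd]

-- the pointwise correspondence between A's pull test and B's pushed marks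
lemma cond_iff (f : List Int) (n : Nat) (k : Nat) (hk : k < f.length) :
    mintermCheck f (k : Int) (PySem.List.pyRange 0 (n : Int) 1) = false ↔
      ((k : Int) ∈ dominatedSet f n) := by
  rw [pyRange_map, mintermCheck_false_iff, dominatedSet_mem]
  constructor
  · rintro ⟨j, hj, hb, hv⟩
    have hlt : k ^^^ (1 <<< j) < k := xor_lt_of_testBit k j hb
    have hk' : k ^^^ (1 <<< j) < f.length := by omega
    refine ⟨k ^^^ (1 <<< j), hk', ?_, j, by simpa using hj, ?_, ?_⟩
    · have := hv
      rw [PySem.List.pyGetD_natCast] at this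
      rwa [List.getD_eq_getElem?_getD, List.getElem?_eq_getElem hk', Option.getD_some] at this
    · simp [Nat.testBit_xor, Nat.one_shiftLeft, hb]
    · congr 1
      apply Nat.eq_of_testBit_eq
      intro i
      by_cases hij : i = j
      · subst hij
        simp [Nat.testBit_or, Nat.testBit_xor, Nat.one_shiftLeft, hb]
      · simp [Nat.testBit_or, Nat.testBit_xor, Nat.one_shiftLeft, Ne.symm hij]
  · rintro ⟨k', hk', h1, j, hj, h2, h3⟩
    have hkk : k = k' ||| (1 <<< j) := by exact_mod_cast h3
    have hb : Nat.testBit k j := by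
      simp [hkk, Nat.testBit_or, Nat.one_shiftLeft]
    have hx : k ^^^ (1 <<< j) = k' := by
      apply Nat.eq_of_testBit_eq
      intro i
      by_cases hij : i = j
      · subst hij
        simp [hkk, Nat.testBit_xor, Nat.testBit_or, Nat.one_shiftLeft, h2]
      · simp [hkk, Nat.testBit_xor, Nat.testBit_or, Nat.one_shiftLeft, Ne.symm hij]
    refine ⟨j, by simpa using hj, hb, ?_⟩
    rw [hx, PySem.List.pyGetD_natCast,
      List.getD_eq_getElem?_getD, List.getElem?_eq_getElem hk', Option.getD_some]
    exact h1

-- ===== VERDICT (by name: the statement is the Claim_ definition above) =====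
theorem find_minterms_spec : Claim_equal_find_minterms := by
  intro f _
  show find_minterms f = find_minterms_alt f
  simp only [find_minterms, find_minterms_alt]
  generalize takeLogAux f.length 1 = n
  rw [PySem.List.foldl_congr_mem' (PySem.List.enumerate f 0) _
    (fun answer iv =>
      if (!(PySem.List.pyGetD f iv.1 0 == 0) &&
          !(PySem.Set.contains (dominatedSet f n) iv.1)) then answer ++ [iv.1] else answer) []
    (by
      intro iv hiv acc
      rcases (PySem.List.mem_enumerate_iff _ _ _).mp hiv with ⟨k, hk, rfl⟩
      simp only [zero_add]
      by_cases h0 : PySem.List.pyGetD f (k : Int) 0 = 0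
      · simp [h0]
      · by_cases hm : mintermCheck f (k : Int) (PySem.List.pyRange 0 (n : Int) 1) = false
        · have hdom : (k : Int) ∈ dominatedSet f n := (cond_iff f n k hk).mp hm
          simp [hm]
          exact fun _ => hdom
        · have hm' : mintermCheck f (k : Int) (PySem.List.pyRange 0 (n : Int) 1) = true := by
            simpa [Bool.not_eq_false] using hm
          have hdom : ¬ ((k : Int) ∈ dominatedSet f n) := fun h =>
            hm ((cond_iff f n k hk).mpr h)
          rw [PySem.List.pyGetD_natCast, List.getD_eq_getElem?_getD] at h0
          simp [h0, hm', hdom])]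
  rw [PySem.List.foldl_append_if]
  rw [List.nil_append]
  apply congrArg
  apply List.filter_congr
  intro iv hiv
  rcases (PySem.List.mem_enumerate_iff _ _ _).mp hiv with ⟨k, hk, rfl⟩
  simp only [zero_add]
  have hget : PySem.List.pyGetD f (k : Int) 0 = f[k] := by
    rw [PySem.List.pyGetD_natCast,
      List.getD_eq_getElem?_getD, List.getElem?_eq_getElem hk, Option.getD_some]
  simp [hget, bne]
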